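-- pv_equiv track=rewrite | github.com/mohammadfaiizan/ProjectI | DSA/Problem/Graph/10_Graph_Coloring_Independent_Set/1557_Minimum_Number_of_Vertices_to_Reach_All_Nodes.py | findSmallestSetOfVertices_approach5_graph_theory_analysis
-- ===== SOURCE A (Python) =====
-- from typing import List, Dict, Set, Tuple, Optional
-- from collections import defaultdict, deque
--
-- def findSmallestSetOfVertices_approach5_graph_theory_analysis(n: int, edges: List[List[int]]) -> List[int]:
--     """
--     Approach 5: Comprehensive Graph Theory Analysis
--
--     Detailed analysis using graph theory concepts.
--
--     Time: O(V + E)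
--     Space: O(V + E)
--     """
--     # Build comprehensive graph representation
--     graph = defaultdict(list)
--     reverse_graph = defaultdict(list)
--     indegree = [0] * n
--     outdegree = [0] * n
--
--     for from_node, to_node in edges:
--         graph[from_node].append(to_node)
--         reverse_graph[to_node].append(from_node)
--         indegree[to_node] += 1
--         outdegree[from_node] += 1
--
--     # Analyze vertex properties
--     sources = []  # Vertices with indegree 0
--     sinks = []    # Vertices with outdegree 0
--
--     for i in range(n):
--         if indegree[i] == 0:
--             sources.append(i)
--         if outdegree[i] == 0:
--             sinks.append(i)
--
--     # For minimum dominating set in DAG, sources are the answer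
--     # Verify by checking reachability
--     total_reachable = set()
--
--     def compute_reachable(start):
--         """Compute all vertices reachable from start"""
--         reachable = set()
--         stack = [start]
--
--         while stack:
--             node = stack.pop()
--             if node in reachable:
--                 continue
--
--             reachable.add(node)
--
--             for neighbor in graph[node]:
--                 if neighbor not in reachable:
--                     stack.append(neighbor)
--
--         return reachable
--
--     # Check that sources cover all vertices
--     for source in sources:
--         reachable = compute_reachable(source)
--         total_reachable.update(reachable)
--
--     # Should cover all vertices in a connected DAG
--     assert len(total_reachable) == n or len(sources) == n  # Handle disconnected case
--
--     return sources
-- ===== SOURCE B (Python) =====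
-- def findSmallestSetOfVertices_approach5_graph_theory_analysis(n, edges):
--     # one pass: forward adjacency + indegree only (no reverse graph / outdegree)
--     graph = {}
--     indegree = [0] * n
--     for from_node, to_node in edges:
--         graph.setdefault(from_node, []).append(to_node)
--         indegree[to_node] += 1
--     sources = [i for i in range(n) if indegree[i] == 0]
--     # single multi-source level-by-level expansion instead of one DFS per source
--     reached = set(sources)
--     frontier = sources
--     while frontier:
--         frontier = [w for v in frontier for w in graph.get(v, []) if w not in reached]
--         reached.update(frontier)
--     assert len(reached) == n or len(sources) == n
--     return sources
-- ===== Notes on version B (the rewrite author's own statement) =====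
-- stated objective: simpler
-- what changed: B drops the unused reverse graph / outdegree / sinks bookkeeping and replaces A's per-source DFS with a union of the results by a single multi-source level-by-level frontier expansion seeded with all indegree-0 vertices at once (A is O(S*(V+E)) over S sources, B is O(V+E)).
import Mathlib
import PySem

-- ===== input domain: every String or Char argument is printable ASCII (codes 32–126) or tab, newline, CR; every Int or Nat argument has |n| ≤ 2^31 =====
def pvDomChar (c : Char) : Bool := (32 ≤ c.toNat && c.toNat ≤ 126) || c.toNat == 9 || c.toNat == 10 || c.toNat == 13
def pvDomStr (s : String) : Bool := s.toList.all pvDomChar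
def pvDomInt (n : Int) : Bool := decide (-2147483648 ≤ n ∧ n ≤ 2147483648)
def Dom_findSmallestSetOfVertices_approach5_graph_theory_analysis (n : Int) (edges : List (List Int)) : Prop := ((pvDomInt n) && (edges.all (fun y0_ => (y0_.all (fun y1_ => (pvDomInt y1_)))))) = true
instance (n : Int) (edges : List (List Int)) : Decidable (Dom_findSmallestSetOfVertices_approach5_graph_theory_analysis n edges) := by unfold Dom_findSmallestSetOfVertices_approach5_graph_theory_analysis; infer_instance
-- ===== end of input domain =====

-- B replaces A's per-source DFS + union by one multi-source frontier expansion and drops the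
-- unused reverse graph / outdegree / sinks bookkeeping; the return value (the indegree-0 vertices) is unchanged.

-- ===== PORT A =====

-- one step of A's edge loop (builds graph, reverse_graph, indegree, outdegree);
-- a row that is not a 2-element list raises ValueError in Python — excluded by Pre_, the port skips it
def pvStepA (st : PySem.Dict Int (List Int) × PySem.Dict Int (List Int) × List Int × List Int)
    (e : List Int) : PySem.Dict Int (List Int) × PySem.Dict Int (List Int) × List Int × List Int :=
  match e with
  | [a, b] =>
      (st.1.modify a [] (· ++ [b]),
       st.2.1.modify b [] (· ++ [a]),
       PySem.List.pySetD st.2.2.1 b (PySem.List.pyGetD st.2.2.1 b 0 + 1),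
       PySem.List.pySetD st.2.2.2 a (PySem.List.pyGetD st.2.2.2 a 0 + 1))
  | _ => st

-- termination universe: every value the traversal can ever see (a proof artifact, not a Python step)
def pvUniv (n : Int) (edges : List (List Int)) : List Int :=
  PySem.List.pyRange 0 n 1 ++ edges.flatMap (fun e => e)

-- termination helper, cited by name in both ports' decreasing_by
theorem pv_len_filter_lt (U : List Int) (p q : Int → Bool)
    (hpq : ∀ x, q x = true → p x = true) (w : Int) (hpw : p w = true) (hqw : q w = false)
    (hw : w ∈ U) :
    (U.filter q).length < (U.filter p).length := by
  have heq : U.filter q = (U.filter p).filter q := by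
    rw [List.filter_filter]
    apply List.filter_congr
    intro x hx
    cases hqx : q x with
    | false => simp
    | true => simp [hpq x hqx]
  rw [heq]
  exact List.length_filter_lt_length_iff_exists.mpr ⟨w, List.mem_filter.mpr ⟨hw, hpw⟩, by simp [hqw]⟩

-- A's compute_reachable: explicit stack, pop from the end ('node ∉ U' is a termination guard only; it never
-- fires because every stack element lies in U)
def pvDfsA (adj : Int → List Int) (U : List Int) (reach : PySem.Set Int) (stack : List Int) :
    PySem.Set Int :=
  match h : stack.getLast? with
  | none => reach
  | some node =>
    let rest := stack.dropLast
    if node ∈ reach ∨ node ∉ U then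
      pvDfsA adj U reach rest
    else
      let reach' := PySem.Set.add reach node
      pvDfsA adj U reach' (rest ++ (adj node).filter (fun nb => decide (nb ∉ reach')))
termination_by ((U.filter (fun u => decide (u ∉ reach))).length, stack.length)
decreasing_by
  · obtain ⟨ys, rfl⟩ := List.getLast?_eq_some_iff.mp h
    apply Prod.Lex.right
    simp
  · obtain ⟨ys, rfl⟩ := List.getLast?_eq_some_iff.mp h
    apply Prod.Lex.left
    rename_i hcond
    rw [not_or, not_not] at hcond
    refine pv_len_filter_lt U _ _ ?_ node ?_ ?_ hcond.2
    · intro x hx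
      simp only [decide_eq_true_eq, PySem.Set.mem_add] at *
      tauto
    · simp [hcond.1]
    · simp [PySem.Set.mem_add]

def findSmallestSetOfVertices_approach5_graph_theory_analysis (n : Int) (edges : List (List Int)) :
    List Int :=
  let st := edges.foldl pvStepA
    (PySem.Dict.empty, PySem.Dict.empty, List.replicate n.toNat 0, List.replicate n.toNat 0)
  let graph := st.1
  let indegree := st.2.2.1
  let outdegree := st.2.2.2
  let sk := (PySem.List.pyRange 0 n 1).foldl
      (fun p i => (if PySem.List.pyGetD indegree i 0 = 0 then p.1 ++ [i] else p.1,
                   if PySem.List.pyGetD outdegree i 0 = 0 then p.2 ++ [i] else p.2)) ([], [])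
  let sources := sk.1
  let adj := fun v => graph.getD v []
  let U := pvUniv n edges
  let totalReachable := sources.foldl
      (fun tot s => PySem.Set.update tot (pvDfsA adj U PySem.Set.empty [s])) PySem.Set.empty
  -- Python's assert raises AssertionError when the condition is false; such inputs are excluded by Pre_
  if PySem.Set.len totalReachable = n ∨ PySem.List.len sources = n then sources else []

-- ===== PORT B =====

-- one step of B's edge loop (forward graph and indegree only)
def pvStepB (st : PySem.Dict Int (List Int) × List Int) (e : List Int) :
    PySem.Dict Int (List Int) × List Int :=
  match e with
  | [a, b] =>
      (st.1.modify a [] (· ++ [b]),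
       PySem.List.pySetD st.2 b (PySem.List.pyGetD st.2 b 0 + 1))
  | _ => st

-- B's multi-source level-by-level expansion; one round of it:
def pvNewFrontier (adj : Int → List Int) (U : List Int) (reached : PySem.Set Int)
    (frontier : List Int) : List Int :=
  (frontier.flatMap adj).filter (fun w => decide (w ∉ reached) && decide (w ∈ U))

-- ('w ∈ U' above is a termination guard only; adjacency values all lie in U)
def pvSatB (adj : Int → List Int) (U : List Int) (reached : PySem.Set Int) (frontier : List Int) :
    PySem.Set Int :=
  let newf := pvNewFrontier adj U reached frontier
  if h : newf = [] then reached
  else pvSatB adj U (PySem.Set.update reached newf) newf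
termination_by (U.filter (fun u => decide (u ∉ reached))).length
decreasing_by
  obtain ⟨w, hw⟩ := List.exists_mem_of_ne_nil _ h
  have hw' : w ∈ pvNewFrontier adj U reached frontier := hw
  simp only [pvNewFrontier, List.mem_filter, Bool.and_eq_true, decide_eq_true_eq] at hw'
  refine pv_len_filter_lt U _ _ ?_ w ?_ ?_ hw'.2.2
  · intro x hx
    simp only [decide_eq_true_eq, PySem.Set.mem_update] at *
    tauto
  · simp only [decide_eq_true_eq]
    exact hw'.2.1
  · simp only [decide_eq_false_iff_not, not_not, PySem.Set.mem_update]
    exact Or.inr hw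

def findSmallestSetOfVertices_approach5_graph_theory_analysis_alt (n : Int)
    (edges : List (List Int)) : List Int :=
  let st := edges.foldl pvStepB (PySem.Dict.empty, List.replicate n.toNat 0)
  let graph := st.1
  let indegree := st.2
  let sources := (PySem.List.pyRange 0 n 1).filter
      (fun i => decide (PySem.List.pyGetD indegree i 0 = 0))
  let adj := fun v => graph.getD v []
  let reached := pvSatB adj (pvUniv n edges) (PySem.Set.ofList sources) sources
  if PySem.Set.len reached = n ∨ PySem.List.len sources = n then sources else []

-- ===== PRECONDITION & SPEC =====

-- helpers for Pre_ (independent of both ports): the wrapped target index of a row, the indegree-0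
-- vertices, the successor relation and its saturation from those vertices
def pvWrap (n v : Int) : Int := if v < 0 then n + v else v
def pvRowTo (n : Int) (e : List Int) : Option Int :=
  match e with | [_, b] => some (pvWrap n b) | _ => none
def pvSources (n : Int) (edges : List (List Int)) : List Int :=
  (PySem.List.pyRange 0 n 1).filter (fun i => edges.all (fun e => pvRowTo n e ≠ some i))
def pvSucc (edges : List (List Int)) (v : Int) : List Int :=
  edges.filterMap (fun e => match e with | [a, b] => if a = v then some b else none | _ => none)
def pvReachAux (edges : List (List Int)) : Nat → PySem.Set Int → List Int → PySem.Set Int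
  | 0, S, _ => S
  | k + 1, S, frontier =>
      let new := (frontier.flatMap (pvSucc edges)).filter (fun w => decide (w ∉ S))
      pvReachAux edges k (PySem.Set.update S new) new
-- pvSources is duplicate-free by construction (a filter of a range), so it is a valid Set seed
def pvReach (n : Int) (edges : List (List Int)) : PySem.Set Int :=
  pvReachAux edges (n.toNat + edges.length) (pvSources n edges) (pvSources n edges)

-- Pre_ excludes exactly the inputs where Python A raises: negative n and malformed/out-of-range rows
-- (ValueError/IndexError) and graphs whose indegree-0 vertices do not reach everything (AssertionError).
def Pre_findSmallestSetOfVertices_approach5_graph_theory_analysis (n : Int)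
    (edges : List (List Int)) : Prop :=
  0 ≤ n ∧
  (∀ e ∈ edges, e.length = 2 ∧ ∀ v ∈ e, PySem.Raise.InRange n.toNat v) ∧
  (PySem.Set.len (pvReach n edges) = n ∨ PySem.List.len (pvSources n edges) = n)
instance (n : Int) (edges : List (List Int)) :
    Decidable (Pre_findSmallestSetOfVertices_approach5_graph_theory_analysis n edges) := by
  unfold Pre_findSmallestSetOfVertices_approach5_graph_theory_analysis; infer_instance

def pvWitness_findSmallestSetOfVertices_approach5_graph_theory_analysis : Int × List (List Int) :=
  (3, [[0, 1], [0, 2]])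

def Spec_findSmallestSetOfVertices_approach5_graph_theory_analysis (n : Int)
    (edges : List (List Int)) (out : List Int) : Prop :=
  out = findSmallestSetOfVertices_approach5_graph_theory_analysis_alt n edges
instance (n : Int) (edges : List (List Int)) (out : List Int) :
    Decidable (Spec_findSmallestSetOfVertices_approach5_graph_theory_analysis n edges out) := by
  unfold Spec_findSmallestSetOfVertices_approach5_graph_theory_analysis; infer_instance

-- ===== CLAIM (what is proved, stated in full; the proofs are below) =====
def Claim_equal_findSmallestSetOfVertices_approach5_graph_theory_analysis : Prop :=
  ∀ (n : Int) (edges : List (List Int)),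
    Dom_findSmallestSetOfVertices_approach5_graph_theory_analysis n edges →
    Pre_findSmallestSetOfVertices_approach5_graph_theory_analysis n edges →
    Spec_findSmallestSetOfVertices_approach5_graph_theory_analysis n edges
      (findSmallestSetOfVertices_approach5_graph_theory_analysis n edges)

-- ===== LEMMAS AND PROOFS =====

-- closure of a vertex set under the adjacency function (proof-only notion)
def pvClosed (adj : Int → List Int) (T : List Int) : Prop := ∀ v ∈ T, ∀ w ∈ adj v, w ∈ T

theorem pvDfsA_spec (adj : Int → List Int) (U : List Int)
    (HA : ∀ v, ∀ w ∈ adj v, w ∈ U) :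
    ∀ (reach : PySem.Set Int) (stack : List Int),
    (∀ x ∈ stack, x ∈ U) →
    (∀ v ∈ reach, ∀ w ∈ adj v, w ∈ reach ∨ w ∈ stack) →
    reach.Nodup →
    (pvDfsA adj U reach stack).Nodup ∧
    (∀ x ∈ reach, x ∈ pvDfsA adj U reach stack) ∧
    (∀ x ∈ stack, x ∈ pvDfsA adj U reach stack) ∧
    pvClosed adj (pvDfsA adj U reach stack) ∧
    (∀ T, pvClosed adj T → (∀ x ∈ reach, x ∈ T) → (∀ x ∈ stack, x ∈ T) →
      ∀ x ∈ pvDfsA adj U reach stack, x ∈ T) := by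
  intro reach stack
  fun_induction pvDfsA adj U reach stack
  · rename_i reach stack h
    rw [List.getLast?_eq_none_iff] at h
    subst h
    intro _ hinv hnd
    refine ⟨hnd, fun x hx => hx, by simp, ?_, fun T _ hrT _ x hx => hrT x hx⟩
    intro v hv w hw
    rcases hinv v hv w hw with h | h
    · exact h
    · simp at h
  · rename_i reach stack node h1 rest hcond ih
    intro hU hinv hnd
    have hrest : rest = stack.dropLast := rfl
    clear_value rest
    obtain ⟨ys, rfl⟩ := List.getLast?_eq_some_iff.mp h1
    rw [List.dropLast_concat] at hrest
    subst hrest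
    have hnode : node ∈ reach := by
      rcases hcond with h | h
      · exact h
      · exact absurd (hU node (by simp)) h
    obtain ⟨A1, A2, A3, A4, A5⟩ := ih
      (fun x hx => hU x (List.mem_append_left _ hx))
      (by
        intro v hv w hw
        rcases hinv v hv w hw with h | h
        · exact Or.inl h
        · rcases List.mem_append.mp h with h | h
          · exact Or.inr h
          · simp at h; subst h; exact Or.inl hnode)
      hnd
    refine ⟨A1, A2, ?_, A4, ?_⟩
    · intro x hx
      rcases List.mem_append.mp hx with h | h
      · exact A3 x h
      · simp at h; rw [h]; exact A2 node hnode
    · intro T hT hrT hsT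
      exact A5 T hT hrT (fun x hx => hsT x (List.mem_append_left _ hx))
  · rename_i reach stack node h1 rest hcond reach' ih
    intro hU hinv hnd
    rw [not_or, not_not] at hcond
    obtain ⟨hnr, hnU⟩ := hcond
    have hrest : rest = stack.dropLast := rfl
    have hreach' : reach' = PySem.Set.add reach node := rfl
    clear_value rest reach'
    obtain ⟨ys, rfl⟩ := List.getLast?_eq_some_iff.mp h1
    rw [List.dropLast_concat] at hrest
    subst hrest
    subst hreach'
    obtain ⟨A1, A2, A3, A4, A5⟩ := ih
      (by
        intro x hx
        rcases List.mem_append.mp hx with h | h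
        · exact hU x (List.mem_append_left _ h)
        · exact HA node x (List.mem_filter.mp h).1)
      (by
        intro v hv w hw
        rcases (PySem.Set.mem_add _ _ _).mp hv with hv' | hv'
        · rcases hinv v hv' w hw with h | h
          · exact Or.inl ((PySem.Set.mem_add _ _ _).mpr (Or.inl h))
          · rcases List.mem_append.mp h with h | h
            · exact Or.inr (List.mem_append_left _ h)
            · simp at h; subst h
              exact Or.inl ((PySem.Set.mem_add _ _ _).mpr (Or.inr rfl))
        · subst hv'
          by_cases hwr : w ∈ PySem.Set.add reach v
          · exact Or.inl hwr
          · exact Or.inr (List.mem_append_right _ (List.mem_filter.mpr ⟨hw, by simpa using hwr⟩)))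
      (PySem.Set.nodup_add reach node hnd)
    refine ⟨A1, ?_, ?_, A4, ?_⟩
    · exact fun x hx => A2 x ((PySem.Set.mem_add _ _ _).mpr (Or.inl hx))
    · intro x hx
      rcases List.mem_append.mp hx with h | h
      · exact A3 x (List.mem_append_left _ h)
      · simp at h; rw [h]
        exact A2 node ((PySem.Set.mem_add _ _ _).mpr (Or.inr rfl))
    · intro T hT hrT hsT
      refine A5 T hT ?_ ?_
      · intro x hx
        rcases (PySem.Set.mem_add _ _ _).mp hx with h | h
        · exact hrT x h
        · subst h; exact hsT x (by simp)
      · intro x hx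
        rcases List.mem_append.mp hx with h | h
        · exact hsT x (List.mem_append_left _ h)
        · exact hT node (hsT node (by simp)) x (List.mem_filter.mp h).1

theorem pvSatB_spec (adj : Int → List Int) (U : List Int)
    (HA : ∀ v, ∀ w ∈ adj v, w ∈ U) :
    ∀ (reached : PySem.Set Int) (frontier : List Int),
    (∀ x ∈ frontier, x ∈ reached) →
    (∀ v ∈ reached, v ∈ frontier ∨ ∀ w ∈ adj v, w ∈ reached) →
    reached.Nodup →
    (pvSatB adj U reached frontier).Nodup ∧
    (∀ x ∈ reached, x ∈ pvSatB adj U reached frontier) ∧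
    pvClosed adj (pvSatB adj U reached frontier) ∧
    (∀ T, pvClosed adj T → (∀ x ∈ reached, x ∈ T) →
      ∀ x ∈ pvSatB adj U reached frontier, x ∈ T) := by
  intro reached frontier
  have hch : ∀ (r : PySem.Set Int) (fr : List Int) (w : Int),
      w ∈ pvNewFrontier adj U r fr ↔ ((∃ v ∈ fr, w ∈ adj v) ∧ w ∉ r ∧ w ∈ U) := by
    intro r fr w
    simp [pvNewFrontier, List.mem_filter, List.mem_flatMap]
  fun_induction pvSatB adj U reached frontier
  · rename_i reached frontier newf h
    have hnewf : newf = pvNewFrontier adj U reached frontier := rfl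
    clear_value newf
    subst hnewf
    intro hfr hinv hnd
    refine ⟨hnd, fun x hx => hx, ?_, fun T _ hrT x hx => hrT x hx⟩
    intro v hv w hw
    rcases hinv v hv with h' | h'
    · by_contra hwr
      have : w ∈ pvNewFrontier adj U reached frontier :=
        (hch _ _ w).mpr ⟨⟨v, h', hw⟩, hwr, HA v w hw⟩
      rw [h] at this
      simp at this
    · exact h' w hw
  · rename_i reached frontier newf h ih
    have hnewf : newf = pvNewFrontier adj U reached frontier := rfl
    clear_value newf
    subst hnewf
    intro hfr hinv hnd
    obtain ⟨A1, A2, A3, A4⟩ := ih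
      (fun x hx => (PySem.Set.mem_update _ _ _).mpr (Or.inr hx))
      (by
        intro v hv
        rcases (PySem.Set.mem_update _ _ _).mp hv with hv' | hv'
        · rcases hinv v hv' with h' | h'
          · right
            intro w hw
            by_cases hwr : w ∈ reached
            · exact (PySem.Set.mem_update _ _ _).mpr (Or.inl hwr)
            · exact (PySem.Set.mem_update _ _ _).mpr
                (Or.inr ((hch _ _ w).mpr ⟨⟨v, h', hw⟩, hwr, HA v w hw⟩))
          · exact Or.inr fun w hw => (PySem.Set.mem_update _ _ _).mpr (Or.inl (h' w hw))
        · exact Or.inl hv')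
      (PySem.Set.nodup_update _ _ hnd)
    refine ⟨A1, ?_, A3, ?_⟩
    · exact fun x hx => A2 x ((PySem.Set.mem_update _ _ _).mpr (Or.inl hx))
    · intro T hT hrT
      refine A4 T hT ?_
      intro x hx
      rcases (PySem.Set.mem_update _ _ _).mp hx with h' | h'
      · exact hrT x h'
      · obtain ⟨⟨v, hv, hxv⟩, -, -⟩ := (hch _ _ x).mp h'
        exact hT v (hrT v (hfr v hv)) x hxv

theorem pv_mem_foldl_update (f : Int → PySem.Set Int) :
    ∀ (l : List Int) (init : PySem.Set Int) (x : Int),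
    (x ∈ l.foldl (fun t s => PySem.Set.update t (f s)) init ↔ x ∈ init ∨ ∃ s ∈ l, x ∈ f s) := by
  intro l
  induction l with
  | nil => simp
  | cons a t ih =>
    intro init x
    simp only [List.foldl_cons, ih, PySem.Set.mem_update, List.mem_cons]
    constructor
    · rintro ((h | h) | ⟨s, hs, hx⟩)
      · exact Or.inl h
      · exact Or.inr ⟨a, Or.inl rfl, h⟩
      · exact Or.inr ⟨s, Or.inr hs, hx⟩
    · rintro (h | ⟨s, (rfl | hs), hx⟩)
      · exact Or.inl (Or.inl h)
      · exact Or.inl (Or.inr hx)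
      · exact Or.inr ⟨s, hs, hx⟩

theorem pv_nodup_foldl_update (f : Int → PySem.Set Int) :
    ∀ (l : List Int) (init : PySem.Set Int), init.Nodup →
    (l.foldl (fun t s => PySem.Set.update t (f s)) init).Nodup := by
  intro l
  induction l with
  | nil => exact fun init h => h
  | cons a t ih => exact fun init h => ih _ (PySem.Set.nodup_update _ _ h)

theorem pvBuild_agree (edges : List (List Int)) :
    ∀ (g rg : PySem.Dict Int (List Int)) (ind outd : List Int),
    ((edges.foldl pvStepA (g, rg, ind, outd)).1 = (edges.foldl pvStepB (g, ind)).1) ∧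
    ((edges.foldl pvStepA (g, rg, ind, outd)).2.2.1 = (edges.foldl pvStepB (g, ind)).2) := by
  induction edges with
  | nil => simp
  | cons e t ih =>
    intro g rg ind outd
    match e with
    | [] => simpa only [List.foldl_cons, pvStepA, pvStepB] using ih g rg ind outd
    | [a] => simpa only [List.foldl_cons, pvStepA, pvStepB] using ih g rg ind outd
    | [a, b] => simpa only [List.foldl_cons, pvStepA, pvStepB] using ih _ _ _ _
    | a :: b :: c :: r => simpa only [List.foldl_cons, pvStepA, pvStepB] using ih g rg ind outd

theorem pvAdj_sub (edges : List (List Int)) :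
    ∀ (g : PySem.Dict Int (List Int)) (ind : List Int) (v w : Int),
    w ∈ ((edges.foldl pvStepB (g, ind)).1.getD v []) →
    w ∈ g.getD v [] ∨ w ∈ edges.flatMap (fun e => e) := by
  induction edges with
  | nil => simp
  | cons e t ih =>
    intro g ind v w hw
    match e with
    | [] =>
      rcases ih _ _ v w hw with h | h
      · exact Or.inl h
      · right; simp only [List.flatMap_cons]; exact List.mem_append_right _ h
    | [a] =>
      rcases ih _ _ v w hw with h | h
      · exact Or.inl h
      · right; simp only [List.flatMap_cons]; exact List.mem_append_right _ h
    | a :: b :: c :: r =>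
      rcases ih _ _ v w hw with h | h
      · exact Or.inl h
      · right; simp only [List.flatMap_cons]; exact List.mem_append_right _ h
    | [a, b] =>
      simp only [List.foldl_cons, pvStepB] at hw
      rcases ih _ _ v w hw with h | h
      · rw [PySem.Dict.getD_modify] at h
        by_cases hva : v = a
        · rw [if_pos hva] at h
          rcases List.mem_append.mp h with h | h
          · subst hva; exact Or.inl h
          · right
            simp only [List.flatMap_cons, List.mem_append]
            exact Or.inl (List.mem_cons_of_mem a h)
        · rw [if_neg hva] at h
          exact Or.inl h
      · right; simp only [List.flatMap_cons]; exact List.mem_append_right _ h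

theorem pv_foldl_pair_fst (P Q : Int → Prop) [DecidablePred P] [DecidablePred Q] :
    ∀ (l : List Int) (s0 t0 : List Int),
    (l.foldl (fun p i => (if P i then p.1 ++ [i] else p.1, if Q i then p.2 ++ [i] else p.2))
      (s0, t0)).1 = s0 ++ l.filter (fun i => decide (P i)) := by
  intro l
  induction l with
  | nil => simp
  | cons a t ih =>
    intro s0 t0
    by_cases hP : P a <;> simp [hP, ih]

theorem pv_core (adj : Int → List Int) (U S : List Int) (n : Int)
    (hA : ∀ v, ∀ w ∈ adj v, w ∈ U) (hS : ∀ x ∈ S, x ∈ U) :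
    (if PySem.Set.len (S.foldl
        (fun tot s => PySem.Set.update tot (pvDfsA adj U PySem.Set.empty [s]))
        PySem.Set.empty) = n ∨ PySem.List.len S = n then S else []) =
    (if PySem.Set.len (pvSatB adj U (PySem.Set.ofList S) S) = n ∨ PySem.List.len S = n
      then S else []) := by
  obtain ⟨hBnd, hBsup, hBclosed, hBmin⟩ := pvSatB_spec adj U hA (PySem.Set.ofList S) S
    (fun x hx => (PySem.Set.mem_ofList _ _).mpr hx)
    (fun v hv => Or.inl ((PySem.Set.mem_ofList _ _).mp hv))
    (PySem.Set.nodup_ofList _)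
  have hdfs := fun s (hs : s ∈ S) => pvDfsA_spec adj U hA PySem.Set.empty [s]
    (by intro x hx; simp at hx; rw [hx]; exact hS s hs)
    (by intro v hv; simp [PySem.Set.empty] at hv)
    (by simp [PySem.Set.empty])
  have hmem : ∀ x, x ∈ S.foldl
      (fun tot s => PySem.Set.update tot (pvDfsA adj U PySem.Set.empty [s])) PySem.Set.empty ↔
      x ∈ pvSatB adj U (PySem.Set.ofList S) S := by
    intro x
    constructor
    · intro hx
      rw [pv_mem_foldl_update (fun s => pvDfsA adj U PySem.Set.empty [s])] at hx
      rcases hx with hx | ⟨s, hs, hx⟩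
      · simp [PySem.Set.empty] at hx
      · exact (hdfs s hs).2.2.2.2 _ hBclosed
          (by intro y hy; simp [PySem.Set.empty] at hy)
          (by intro y hy; simp at hy; rw [hy]
              exact hBsup s ((PySem.Set.mem_ofList _ _).mpr hs))
          x hx
    · intro hx
      refine hBmin _ ?_ ?_ x hx
      · intro v hv w hw
        rw [pv_mem_foldl_update (fun s => pvDfsA adj U PySem.Set.empty [s])] at hv ⊢
        rcases hv with h | ⟨s, hs, hv⟩
        · simp [PySem.Set.empty] at h
        · exact Or.inr ⟨s, hs, (hdfs s hs).2.2.2.1 v hv w hw⟩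
      · intro v hv
        have hvS := (PySem.Set.mem_ofList _ _).mp hv
        rw [pv_mem_foldl_update (fun s => pvDfsA adj U PySem.Set.empty [s])]
        exact Or.inr ⟨v, hvS, (hdfs v hvS).2.2.1 v (by simp)⟩
  have hndtot : (S.foldl
      (fun tot s => PySem.Set.update tot (pvDfsA adj U PySem.Set.empty [s]))
      PySem.Set.empty).Nodup :=
    pv_nodup_foldl_update _ _ _ (by simp [PySem.Set.empty])
  have hperm := (List.perm_ext_iff_of_nodup hndtot hBnd).mpr hmem
  have hlen : PySem.Set.len (S.foldl
      (fun tot s => PySem.Set.update tot (pvDfsA adj U PySem.Set.empty [s]))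
      PySem.Set.empty) = PySem.Set.len (pvSatB adj U (PySem.Set.ofList S) S) := by
    simp only [PySem.Set.len]
    exact_mod_cast hperm.length_eq
  rw [hlen]

theorem main_eq (n : Int) (edges : List (List Int)) :
    findSmallestSetOfVertices_approach5_graph_theory_analysis n edges =
    findSmallestSetOfVertices_approach5_graph_theory_analysis_alt n edges := by
  simp only [findSmallestSetOfVertices_approach5_graph_theory_analysis,
    findSmallestSetOfVertices_approach5_graph_theory_analysis_alt]
  obtain ⟨hg, hi⟩ := pvBuild_agree edges PySem.Dict.empty PySem.Dict.empty
    (List.replicate n.toNat 0) (List.replicate n.toNat 0)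
  rw [hg, hi, pv_foldl_pair_fst
    (fun i => PySem.List.pyGetD (edges.foldl pvStepB (PySem.Dict.empty, List.replicate n.toNat 0)).2 i 0 = 0)
    (fun i => PySem.List.pyGetD (edges.foldl pvStepA (PySem.Dict.empty, PySem.Dict.empty, List.replicate n.toNat 0, List.replicate n.toNat 0)).2.2.2 i 0 = 0)]
  simp only [List.nil_append]
  refine pv_core _ (pvUniv n edges) _ n ?_ ?_
  · intro v w hw
    rcases pvAdj_sub edges PySem.Dict.empty (List.replicate n.toNat 0) v w hw with h | h
    · simp [PySem.Dict.getD_empty] at h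
    · exact List.mem_append_right _ h
  · intro x hx
    exact List.mem_append_left _ (List.mem_filter.mp hx).1

-- ===== VERDICT (by name: the statement is the Claim_ definition above) =====
theorem findSmallestSetOfVertices_approach5_graph_theory_analysis_spec :
    Claim_equal_findSmallestSetOfVertices_approach5_graph_theory_analysis := by
  intro n edges _ _
  exact main_eq n edges
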